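-- pv_equiv track=rewrite | github.com/pypi-data/pypi-mirror-361 | packages/relaiss/relaiss-1.2.2-py3-none-any.whl/relaiss/features.py | create_features_dict
-- ===== SOURCE A (Python) =====
-- import math
--
-- def create_features_dict(
--     lc_feature_names, host_feature_names, lc_groups=4, host_groups=4
-- ):
--     """Partition feature names into evenly-sized groups for weighting.
--
--     Parameters
--     ----------
--     lc_feature_names : list[str]
--         Names of light-curve features.
--     host_feature_names : list[str]
--         Names of host-galaxy features.
--     lc_groups : int, default 4
--         Number of LC groups in the output dict.
--     host_groups : int, default 4
--         Number of host groups in the output dict.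
--
--     Returns
--     -------
--     dict[str, list[str]]
--         ``{'lc_group_1': [...], 'host_group_1': [...], ...}``
--     """
--     feature_dict = {}
--
--     # Split light curve features into evenly sized chunks
--     lc_chunk_size = math.ceil(len(lc_feature_names) / lc_groups)
--     for i in range(lc_groups):
--         start = i * lc_chunk_size
--         end = start + lc_chunk_size
--         chunk = lc_feature_names[start:end]
--         if chunk:
--             feature_dict[f"lc_group_{i+1}"] = chunk
--
--     # Split host features into evenly sized chunks
--     host_chunk_size = math.ceil(len(host_feature_names) / host_groups)
--     for i in range(host_groups):
--         start = i * host_chunk_size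
--         end = start + host_chunk_size
--         chunk = host_feature_names[start:end]
--         if chunk:
--             feature_dict[f"host_group_{i+1}"] = chunk
--
--     return feature_dict
-- ===== SOURCE B (Python) =====
-- import math
--
-- def create_features_dict(
--     lc_feature_names, host_feature_names, lc_groups=4, host_groups=4
-- ):
--     """Partition feature names into evenly-sized groups for weighting.
--
--     Single scatter pass per list: each element is bucketed by its computed
--     group index i // chunk_size instead of slicing once per group.
--     """
--     feature_dict = {}
--     _scatter(feature_dict, "lc_group_", lc_feature_names, lc_groups)
--     _scatter(feature_dict, "host_group_", host_feature_names, host_groups)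
--     return feature_dict
--
--
-- def _scatter(out, prefix, names, groups):
--     chunk_size = math.ceil(len(names) / groups)
--     if groups <= 0:
--         return
--     for i, name in enumerate(names):
--         key = f"{prefix}{i // chunk_size + 1}"
--         if key in out:
--             out[key].append(name)
--         else:
--             out[key] = [name]
-- ===== Notes on version B (the rewrite author's own statement) =====
-- stated objective: alternative
-- what changed: A slices the list once per group inside a for-i-in-range(groups) loop; B makes a single enumerate pass per list and scatters each element into feature_dict[prefix + str(i // chunk_size + 1)], so the per-group slicing loop disappears.
import Mathlib
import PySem

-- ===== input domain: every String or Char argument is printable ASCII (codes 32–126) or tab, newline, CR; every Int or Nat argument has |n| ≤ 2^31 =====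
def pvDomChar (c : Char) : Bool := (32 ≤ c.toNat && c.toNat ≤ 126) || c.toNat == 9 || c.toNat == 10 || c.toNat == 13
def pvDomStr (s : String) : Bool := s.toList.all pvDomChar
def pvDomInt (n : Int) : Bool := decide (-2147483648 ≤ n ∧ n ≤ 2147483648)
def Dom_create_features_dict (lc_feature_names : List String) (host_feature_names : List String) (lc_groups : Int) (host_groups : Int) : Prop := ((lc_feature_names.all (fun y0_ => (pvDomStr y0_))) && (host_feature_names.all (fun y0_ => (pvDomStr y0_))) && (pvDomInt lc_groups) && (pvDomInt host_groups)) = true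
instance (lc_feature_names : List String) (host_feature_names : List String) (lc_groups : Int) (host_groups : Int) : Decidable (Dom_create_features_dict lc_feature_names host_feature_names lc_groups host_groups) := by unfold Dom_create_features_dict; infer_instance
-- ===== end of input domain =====

-- B replaces A's per-group slicing loop by a single scatter pass per list that buckets each
-- element by its computed group index i // chunk_size (objective: alternative decomposition).

-- ===== PORT A =====
-- math.ceil(a / b) on ints: exact integer ceiling division (Python's float division is exact at these magnitudes)
def pyCeilDiv (a b : Int) : Int := -(PySem.Int.floordiv (-a) b)

-- one iteration of A's `for i in range(groups)` body
def aStep (names : List String) (pfx : String) (size : Int)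
    (d : PySem.Dict String (List String)) (i : Int) : PySem.Dict String (List String) :=
  let start := i * size
  let chunk := PySem.List.slice names (some start) (some (start + size))
  if chunk ≠ [] then d.insert (pfx ++ PySem.Int.toStr (i + 1)) chunk else d

def create_features_dict (lc_feature_names : List String) (host_feature_names : List String) (lc_groups : Int) (host_groups : Int) : List (String × List String) :=
  let feature_dict : PySem.Dict String (List String) := PySem.Dict.empty
  let lc_chunk_size := pyCeilDiv (lc_feature_names.length : Int) lc_groups
  let feature_dict := (PySem.List.pyRange 0 lc_groups 1).foldl
      (aStep lc_feature_names "lc_group_" lc_chunk_size) feature_dict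
  let host_chunk_size := pyCeilDiv (host_feature_names.length : Int) host_groups
  let feature_dict := (PySem.List.pyRange 0 host_groups 1).foldl
      (aStep host_feature_names "host_group_" host_chunk_size) feature_dict
  feature_dict.items

-- ===== PORT B =====
-- one iteration of B's `for i, name in enumerate(names)` body
def bStep (pfx : String) (size : Int)
    (d : PySem.Dict String (List String)) (p : Int × String) : PySem.Dict String (List String) :=
  let key := pfx ++ PySem.Int.toStr (PySem.Int.floordiv p.1 size + 1)
  match d.get? key with
  | some xs => d.insert key (xs ++ [p.2])
  | none => d.insert key [p.2]

-- B's helper `_scatter`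
def bScatter (out : PySem.Dict String (List String)) (pfx : String)
    (names : List String) (groups : Int) : PySem.Dict String (List String) :=
  let chunk_size := pyCeilDiv (names.length : Int) groups
  if groups ≤ 0 then out
  else (PySem.List.enumerate names 0).foldl (bStep pfx chunk_size) out

def create_features_dict_alt (lc_feature_names : List String) (host_feature_names : List String) (lc_groups : Int) (host_groups : Int) : List (String × List String) :=
  let feature_dict : PySem.Dict String (List String) := PySem.Dict.empty
  let feature_dict := bScatter feature_dict "lc_group_" lc_feature_names lc_groups
  let feature_dict := bScatter feature_dict "host_group_" host_feature_names host_groups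
  feature_dict.items

-- ===== PRECONDITION & SPEC =====
-- Pre_ excludes exactly groups = 0, where Python A raises ZeroDivisionError (B raises there too).
def Pre_create_features_dict (lc_feature_names : List String) (host_feature_names : List String) (lc_groups : Int) (host_groups : Int) : Prop :=
  lc_groups ≠ 0 ∧ host_groups ≠ 0
instance (lc_feature_names : List String) (host_feature_names : List String) (lc_groups : Int) (host_groups : Int) : Decidable (Pre_create_features_dict lc_feature_names host_feature_names lc_groups host_groups) := by unfold Pre_create_features_dict; infer_instance

def pvWitness_create_features_dict : List String × List String × Int × Int :=
  (["f1", "f2", "f3"], ["h1"], 2, 4)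

def Spec_create_features_dict (lc_feature_names : List String) (host_feature_names : List String) (lc_groups : Int) (host_groups : Int) (out : List (String × List String)) : Prop := out = create_features_dict_alt lc_feature_names host_feature_names lc_groups host_groups
instance (lc_feature_names : List String) (host_feature_names : List String) (lc_groups : Int) (host_groups : Int) (out : List (String × List String)) : Decidable (Spec_create_features_dict lc_feature_names host_feature_names lc_groups host_groups out) := by unfold Spec_create_features_dict; infer_instance

-- ===== CLAIM (what is proved, stated in full; the proofs are below) =====
def Claim_equal_create_features_dict : Prop := ∀ (lc_feature_names : List String) (host_feature_names : List String) (lc_groups : Int) (host_groups : Int), Dom_create_features_dict lc_feature_names host_feature_names lc_groups host_groups → Pre_create_features_dict lc_feature_names host_feature_names lc_groups host_groups → Spec_create_features_dict lc_feature_names host_feature_names lc_groups host_groups (create_features_dict lc_feature_names host_feature_names lc_groups host_groups)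

-- ===== LEMMAS AND PROOFS =====

-- the common value of both per-list passes: the list of (key, chunk) pairs, chunks of `size`
def chunkPairs (pfx : String) (size : Int) (names : List String) (g : Nat) :
    List (String × List String) :=
  if h : size ≤ 0 ∨ names = [] then []
  else (pfx ++ PySem.Int.toStr (g : Int), names.take size.toNat)
        :: chunkPairs pfx size (names.drop size.toNat) (g + 1)
termination_by names.length
decreasing_by
  push_neg at h
  have h1 : 0 < names.length := List.length_pos_of_ne_nil h.2
  have h2 : 0 < size.toNat := by omega
  simp only [List.length_drop]
  omega

theorem chunkPairs_nil (pfx : String) (size : Int) (g : Nat) :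
    chunkPairs pfx size [] g = [] := by
  rw [chunkPairs]; simp

theorem chunkPairs_cons {size : Int} {names : List String} (pfx : String) (g : Nat)
    (hsize : 0 < size) (hne : names ≠ []) :
    chunkPairs pfx size names g
      = (pfx ++ PySem.Int.toStr (g : Int), names.take size.toNat)
          :: chunkPairs pfx size (names.drop size.toNat) (g + 1) := by
  rw [chunkPairs]
  rw [dif_neg (by push_neg; exact ⟨by omega, hne⟩)]

theorem digitChar_inj {a b : Nat} (ha : a < 10) (hb : b < 10)
    (h : Nat.digitChar a = Nat.digitChar b) : a = b := by
  interval_cases a <;> interval_cases b <;> first | rfl | (exfalso; revert h; decide)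

theorem toDigits10_inj : ∀ m n : Nat, Nat.toDigits 10 m = Nat.toDigits 10 n → m = n := by
  intro m
  induction m using Nat.strong_induction_on with
  | _ m IH =>
    intro n h
    rcases Nat.lt_or_ge m 10 with hm | hm <;> rcases Nat.lt_or_ge n 10 with hn | hn
    · rw [Nat.toDigits_of_lt_base hm, Nat.toDigits_of_lt_base hn] at h
      exact digitChar_inj hm hn (by simpa using h)
    · rw [Nat.toDigits_of_lt_base hm, Nat.toDigits_of_base_le (by norm_num) hn] at h
      have hl := congrArg List.length h
      have hp : 0 < (Nat.toDigits 10 (n / 10)).length := Nat.length_toDigits_pos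
      simp only [List.length_cons, List.length_nil, List.length_append] at hl
      omega
    · rw [Nat.toDigits_of_base_le (by norm_num) hm, Nat.toDigits_of_lt_base hn] at h
      have hl := congrArg List.length h
      have hp : 0 < (Nat.toDigits 10 (m / 10)).length := Nat.length_toDigits_pos
      simp only [List.length_cons, List.length_nil, List.length_append] at hl
      omega
    · rw [Nat.toDigits_of_base_le (by norm_num) hm, Nat.toDigits_of_base_le (by norm_num) hn] at h
      have h2 := List.append_inj' h (by rfl)
      have hq := IH (m / 10) (Nat.div_lt_self (by omega) (by norm_num)) (n / 10) h2.1
      have hr := digitChar_inj (Nat.mod_lt _ (by norm_num)) (Nat.mod_lt _ (by norm_num))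
        (by simpa using h2.2)
      omega

theorem toChars_inj {a b : Int} (ha : 0 ≤ a) (hb : 0 ≤ b)
    (h : PySem.Int.toChars a = PySem.Int.toChars b) : a = b := by
  unfold PySem.Int.toChars at h
  rw [if_neg (not_lt.mpr ha), if_neg (not_lt.mpr hb)] at h
  have := toDigits10_inj _ _ h
  omega

theorem key_inj {pfx : String} {a b : Int} (ha : 0 ≤ a) (hb : 0 ≤ b)
    (h : pfx ++ PySem.Int.toStr a = pfx ++ PySem.Int.toStr b) : a = b := by
  have h' := congrArg String.toList h
  rw [String.toList_append, String.toList_append, PySem.Int.toList_toStr,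
    PySem.Int.toList_toStr] at h'
  exact toChars_inj ha hb (List.append_cancel_left h')

theorem key_ne {pfx : String} {a b : Int} (ha : 0 ≤ a) (hb : 0 ≤ b) (hab : a ≠ b) :
    pfx ++ PySem.Int.toStr a ≠ pfx ++ PySem.Int.toStr b :=
  fun h => hab (key_inj ha hb h)

theorem key_cross (a b : Int) :
    "host_group_" ++ PySem.Int.toStr a ≠ "lc_group_" ++ PySem.Int.toStr b := by
  intro h
  have h' := congrArg String.toList h
  rw [String.toList_append, String.toList_append,
    show ("host_group_" : String).toList = ['h','o','s','t','_','g','r','o','u','p','_'] from by decide,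
    show ("lc_group_" : String).toList = ['l','c','_','g','r','o','u','p','_'] from by decide] at h'
  simp at h'

theorem mem_chunkPairs_key : ∀ (N : Nat) (names : List String), names.length ≤ N →
    ∀ {pfx : String} {size : Int} {g : Nat} {p : String × List String},
    p ∈ chunkPairs pfx size names g →
    ∃ m : Nat, g ≤ m ∧ p.1 = pfx ++ PySem.Int.toStr (m : Int) := by
  intro N
  induction N with
  | zero =>
    intro names hN pfx size g p hp
    have : names = [] := List.eq_nil_of_length_eq_zero (by omega)
    rw [this, chunkPairs_nil] at hp
    exact absurd hp (List.not_mem_nil)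
  | succ N IH =>
    intro names hN pfx size g p hp
    by_cases hguard : size ≤ 0 ∨ names = []
    · rw [chunkPairs, dif_pos hguard] at hp
      exact absurd hp (List.not_mem_nil)
    · push_neg at hguard
      rw [chunkPairs_cons pfx g (by omega) hguard.2] at hp
      rcases List.mem_cons.mp hp with hp | hp
      · exact ⟨g, le_refl g, by rw [hp]⟩
      · have hlen : (names.drop size.toNat).length ≤ N := by
          have h1 : 0 < names.length := List.length_pos_of_ne_nil hguard.2
          have h2 : 0 < size.toNat := by omega
          simp only [List.length_drop]; omega
        obtain ⟨m, hm, hkey⟩ := IH _ hlen hp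
        exact ⟨m, by omega, hkey⟩

-- ceiling-division bracket for pyCeilDiv
theorem pyCeilDiv_bounds {n g : Int} (hg : 0 < g) :
    (pyCeilDiv n g - 1) * g < n ∧ n ≤ pyCeilDiv n g * g := by
  have := (PySem.Int.neg_floordiv_neg_eq_iff_of_pos (a := n) (b := g) (q := pyCeilDiv n g) hg).mp rfl
  exact this

-- slicing the empty list gives the empty list
theorem slice_nil_str (a b : Int) :
    PySem.List.slice ([] : List String) (some a) (some b) = [] := by
  have h := PySem.List.length_slice ([] : List String) a b
  have h1 := PySem.List.clampIdx_le ([] : List String).length b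
  have h2 := PySem.List.clampIdx_le ([] : List String).length a
  simp only [List.length_nil] at h h1 h2
  exact List.eq_nil_of_length_eq_zero (by omega)

theorem foldA_nil (pfx : String) (size : Int) (l : List Int)
    (d : PySem.Dict String (List String)) :
    l.foldl (aStep [] pfx size) d = d := by
  induction l generalizing d with
  | nil => rfl
  | cons i l ih => simp only [List.foldl_cons, aStep, slice_nil_str]; simpa using ih d

-- A-side: the sliced loop from group j appends the chunk pairs of the uncovered suffix
theorem lemA : ∀ (N : Nat) (full : List String) (pfx : String) (size g : Int) (j : Nat)
    (d : PySem.Dict String (List String)),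
    (g - (j : Int)).toNat ≤ N → 0 < size → (j : Int) ≤ g →
    (full.length : Int) ≤ g * size →
    (∀ k : Nat, j < k → d.get? (pfx ++ PySem.Int.toStr (k : Int)) = none) →
    ((PySem.List.pyRange (j : Int) g 1).foldl (aStep full pfx size) d).items
      = d.items ++ chunkPairs pfx size (full.drop (j * size.toNat)) (j + 1) := by
  intro N
  induction N with
  | zero =>
    intro full pfx size g j d hN hsize hj hcov hfresh
    have hjg : g ≤ (j : Int) := by omega
    rw [PySem.List.pyRange_one_eq_nil hjg, List.foldl_nil]
    have hσ : ((size.toNat : Nat) : Int) = size := Int.toNat_of_nonneg hsize.le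
    have hdrop : full.drop (j * size.toNat) = [] := by
      apply List.drop_eq_nil_of_le
      have h1 : (full.length : Int) ≤ ((j * size.toNat : Nat) : Int) := by
        push_cast
        calc (full.length : Int) ≤ g * size := hcov
          _ ≤ (j : Int) * size := by
            apply mul_le_mul_of_nonneg_right hjg hsize.le
          _ = (j : Int) * (size.toNat : Int) := by rw [hσ]
      exact_mod_cast h1
    rw [hdrop, chunkPairs_nil, List.append_nil]
  | succ N IH =>
    intro full pfx size g j d hN hsize hj hcov hfresh
    rcases eq_or_lt_of_le hj with hjg | hjg
    · -- empty range again
      rw [PySem.List.pyRange_one_eq_nil (le_of_eq hjg.symm), List.foldl_nil]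
      have hσ : ((size.toNat : Nat) : Int) = size := Int.toNat_of_nonneg hsize.le
      have hdrop : full.drop (j * size.toNat) = [] := by
        apply List.drop_eq_nil_of_le
        have h1 : (full.length : Int) ≤ ((j * size.toNat : Nat) : Int) := by
          push_cast
          calc (full.length : Int) ≤ g * size := hcov
            _ = (j : Int) * size := by rw [hjg]
            _ = (j : Int) * (size.toNat : Int) := by rw [hσ]
        exact_mod_cast h1
      rw [hdrop, chunkPairs_nil, List.append_nil]
    · rw [PySem.List.pyRange_one_cons hjg, List.foldl_cons]
      have hσ : ((size.toNat : Nat) : Int) = size := Int.toNat_of_nonneg hsize.le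
      set σ := size.toNat with hσdef
      have hstart : (j : Int) * size = ((j * σ : Nat) : Int) := by
        rw [← hσ]; push_cast; ring
      have hastep : aStep full pfx size d (j : Int)
          = (if (full.drop (j * σ)).take σ ≠ [] then
              d.insert (pfx ++ PySem.Int.toStr ((j : Int) + 1)) ((full.drop (j * σ)).take σ)
            else d) := by
        simp only [aStep]
        rw [hstart, show ((j * σ : Nat) : Int) + size = ((j * σ : Nat) : Int) + ((σ : Nat) : Int) by rw [hσ],
          PySem.List.slice_natCast_add]
      have hcast1 : ((j : Int) + 1) = (((j + 1 : Nat)) : Int) := by push_cast; ring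
      by_cases hsuf : full.drop (j * σ) = []
      · rw [hastep, hsuf]
        simp only [List.take_nil, ne_eq, not_true_eq_false, if_false]
        have ih := IH full pfx size g (j + 1) d (by omega) hsize (by push_cast; omega) hcov
          (fun k hk => hfresh k (by omega))
        have hlenle : full.length ≤ j * σ := by
          have hdl := congrArg List.length hsuf
          simp only [List.length_drop, List.length_nil] at hdl
          omega
        have hdrop2 : full.drop ((j + 1) * σ) = [] := by
          apply List.drop_eq_nil_of_le
          nlinarith
        rw [← hσdef] at ih
        rw [hcast1, ih, hdrop2, chunkPairs_nil, chunkPairs_nil]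
      · have hσpos : 0 < σ := by omega
        have hchunk : (full.drop (j * σ)).take σ ≠ [] := by
          intro hnil
          rcases List.take_eq_nil_iff.mp hnil with h | h <;>
            first
              | exact hsuf h
              | omega
        rw [hastep, if_pos hchunk]
        have hkey : pfx ++ PySem.Int.toStr ((j : Int) + 1)
            = pfx ++ PySem.Int.toStr (((j + 1 : Nat)) : Int) := by rw [hcast1]
        set d' := d.insert (pfx ++ PySem.Int.toStr ((j : Int) + 1)) ((full.drop (j * σ)).take σ) with hd'
        have hfresh' : ∀ k : Nat, j + 1 < k → d'.get? (pfx ++ PySem.Int.toStr (k : Int)) = none := by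
          intro k hk
          rw [hd', PySem.Dict.get?_insert_of_ne]
          · exact hfresh k (by omega)
          · rw [hkey]
            exact key_ne (by positivity) (by positivity) (by exact_mod_cast (by omega : k ≠ j + 1))
        have ih := IH full pfx size g (j + 1) d' (by omega) hsize (by push_cast; omega) hcov hfresh'
        rw [← hσdef] at ih
        rw [hcast1, ih]
        have hitems : d'.items = d.items ++ [(pfx ++ PySem.Int.toStr ((j : Int) + 1), (full.drop (j * σ)).take σ)] := by
          rw [hd']
          apply PySem.Dict.items_insert_of_not_contains
          have hnone := hfresh (j + 1) (by omega)
          rw [← hkey] at hnone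
          exact (PySem.Dict.get?_eq_none_iff_contains _ _).mp hnone
        rw [hitems]
        rw [chunkPairs_cons pfx (j + 1) hsize hsuf]
        simp only [← hσdef]
        have hdrops : (full.drop (j * σ)).drop σ = full.drop ((j + 1) * σ) := by
          rw [List.drop_drop]
          congr 1
          ring
        rw [hdrops, hkey]
        simp [List.append_assoc]

-- B-side, inner: a run of elements that all map to key K accumulates into K's list
theorem lemB_acc (pfx : String) (size : Int) :
    ∀ (c : List String) (o : Int) (d : PySem.Dict String (List String)) (K : String)
      (acc : List String),
    (∀ p ∈ PySem.List.enumerate c o,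
      pfx ++ PySem.Int.toStr (PySem.Int.floordiv p.1 size + 1) = K) →
    d.get? K = none →
    (PySem.List.enumerate c o).foldl (bStep pfx size) (d.insert K acc)
      = d.insert K (acc ++ c) := by
  intro c
  induction c with
  | nil => intro o d K acc _ _; simp [PySem.List.enumerate_nil]
  | cons x c ih =>
    intro o d K acc hkeys hd
    rw [PySem.List.enumerate_cons, List.foldl_cons]
    have hk : pfx ++ PySem.Int.toStr (PySem.Int.floordiv o size + 1) = K := by
      apply hkeys (o, x)
      rw [PySem.List.enumerate_cons]
      exact List.mem_cons_self
    have hstep : bStep pfx size (d.insert K acc) (o, x) = d.insert K (acc ++ [x]) := by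
      simp only [bStep, hk, PySem.Dict.get?_insert_self, PySem.Dict.insert_insert_self]
    rw [hstep]
    have := ih (o + 1) d K (acc ++ [x])
      (fun p hp => hkeys p (by rw [PySem.List.enumerate_cons]; exact List.mem_cons_of_mem _ hp)) hd
    rw [this, List.append_assoc]
    rfl

theorem lemB_run (pfx : String) (size : Int) (c : List String) (o : Int)
    (d : PySem.Dict String (List String)) (K : String) (hc : c ≠ [])
    (hkeys : ∀ p ∈ PySem.List.enumerate c o,
      pfx ++ PySem.Int.toStr (PySem.Int.floordiv p.1 size + 1) = K)
    (hd : d.get? K = none) :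
    (PySem.List.enumerate c o).foldl (bStep pfx size) d = d.insert K c := by
  cases c with
  | nil => exact absurd rfl hc
  | cons x c =>
    rw [PySem.List.enumerate_cons, List.foldl_cons]
    have hk : pfx ++ PySem.Int.toStr (PySem.Int.floordiv o size + 1) = K := by
      apply hkeys (o, x)
      rw [PySem.List.enumerate_cons]
      exact List.mem_cons_self
    have hstep : bStep pfx size d (o, x) = d.insert K [x] := by
      simp only [bStep, hk, hd]
    rw [hstep]
    have := lemB_acc pfx size c (o + 1) d K [x]
      (fun p hp => hkeys p (by rw [PySem.List.enumerate_cons]; exact List.mem_cons_of_mem _ hp)) hd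
    rw [this]
    rfl

-- B-side: the scatter pass starting at the j-th group boundary appends the chunk pairs
theorem lemB : ∀ (N : Nat) (names : List String) (pfx : String) (size : Int) (j : Nat)
    (d : PySem.Dict String (List String)),
    names.length ≤ N → 0 < size →
    (∀ k : Nat, j < k → d.get? (pfx ++ PySem.Int.toStr (k : Int)) = none) →
    ((PySem.List.enumerate names ((j : Int) * size)).foldl (bStep pfx size) d).items
      = d.items ++ chunkPairs pfx size names (j + 1) := by
  intro N
  induction N with
  | zero =>
    intro names pfx size j d hN hsize hfresh
    have : names = [] := List.eq_nil_of_length_eq_zero (by omega)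
    rw [this, PySem.List.enumerate_nil, List.foldl_nil, chunkPairs_nil, List.append_nil]
  | succ N IH =>
    intro names pfx size j d hN hsize hfresh
    by_cases hne : names = []
    · rw [hne, PySem.List.enumerate_nil, List.foldl_nil, chunkPairs_nil, List.append_nil]
    · have hσ : ((size.toNat : Nat) : Int) = size := Int.toNat_of_nonneg hsize.le
      set σ := size.toNat with hσdef
      have hσpos : 0 < σ := by omega
      have hlenpos : 0 < names.length := List.length_pos_of_ne_nil hne
      have hcne : names.take σ ≠ [] := by
        simp only [ne_eq, List.take_eq_nil_iff]; push_neg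
        exact ⟨by omega, hne⟩
      have hclen : (names.take σ).length ≤ σ := by simp
      have hcast1 : (((j + 1 : Nat)) : Int) = (j : Int) + 1 := by push_cast; ring
      have hkeys : ∀ p ∈ PySem.List.enumerate (names.take σ) ((j : Int) * size),
          pfx ++ PySem.Int.toStr (PySem.Int.floordiv p.1 size + 1)
            = pfx ++ PySem.Int.toStr (((j + 1 : Nat)) : Int) := by
        intro p hp
        obtain ⟨k, hk, hpk⟩ := (PySem.List.mem_enumerate_iff _ _ _).mp hp
        have hfd : PySem.Int.floordiv p.1 size = (j : Int) := by
          rw [hpk]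
          rw [PySem.Int.floordiv_eq_iff_of_pos hsize]
          constructor
          · nlinarith [Int.natCast_nonneg k]
          · have h1 : (k : Int) < (σ : Int) := by exact_mod_cast lt_of_lt_of_le hk hclen
            rw [hσ] at h1
            nlinarith
        rw [hfd, hcast1]
      have hgetK : d.get? (pfx ++ PySem.Int.toStr (((j + 1 : Nat)) : Int)) = none :=
        hfresh (j + 1) (by omega)
      have hrun := lemB_run pfx size (names.take σ) ((j : Int) * size) d
        (pfx ++ PySem.Int.toStr (((j + 1 : Nat)) : Int)) hcne hkeys hgetK
      conv_lhs => rw [show names = names.take σ ++ names.drop σ from (List.take_append_drop σ names).symm]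
      rw [PySem.List.enumerate_append, List.foldl_append, hrun]
      have hitems : (d.insert (pfx ++ PySem.Int.toStr (((j + 1 : Nat)) : Int)) (names.take σ)).items
          = d.items ++ [(pfx ++ PySem.Int.toStr (((j + 1 : Nat)) : Int), names.take σ)] := by
        apply PySem.Dict.items_insert_of_not_contains
        exact (PySem.Dict.get?_eq_none_iff_contains _ _).mp hgetK
      have hcp : chunkPairs pfx size names (j + 1)
          = (pfx ++ PySem.Int.toStr (((j + 1 : Nat)) : Int), names.take σ)
              :: chunkPairs pfx size (names.drop σ) (j + 2) := by
        rw [chunkPairs_cons pfx (j + 1) hsize hne]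
      by_cases hrestnil : names.drop σ = []
      · rw [hrestnil, PySem.List.enumerate_nil, List.foldl_nil, hitems, hcp, hrestnil,
          chunkPairs_nil]
      · have hlen2 : σ < names.length := by
          by_contra hcon
          exact hrestnil (List.drop_eq_nil_of_le (by omega))
        have hclen2 : ((names.take σ).length : Int) = (σ : Int) := by
          simp; omega
        have hoff : (j : Int) * size + ((names.take σ).length : Int)
            = (((j + 1 : Nat)) : Int) * size := by
          rw [hclen2, hcast1, hσ]; ring
        have hfresh' : ∀ k : Nat, j + 1 < k →
            (d.insert (pfx ++ PySem.Int.toStr (((j + 1 : Nat)) : Int)) (names.take σ)).get?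
              (pfx ++ PySem.Int.toStr (k : Int)) = none := by
          intro k hk
          rw [PySem.Dict.get?_insert_of_ne]
          · exact hfresh k (by omega)
          · exact key_ne (by positivity) (by positivity)
              (by exact_mod_cast (by omega : k ≠ j + 1))
        have ih := IH (names.drop σ) pfx size (j + 1)
          (d.insert (pfx ++ PySem.Int.toStr (((j + 1 : Nat)) : Int)) (names.take σ))
          (by simp; omega) hsize hfresh'
        rw [hoff, ih, hitems, hcp]
        simp

-- per-list: A's loop and B's scatter produce the same dictionary
theorem perList (names : List String) (pfx : String) (g : Int) (hg : g ≠ 0)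
    (d : PySem.Dict String (List String))
    (hfresh : ∀ k : Nat, 0 < k → d.get? (pfx ++ PySem.Int.toStr (k : Int)) = none) :
    (PySem.List.pyRange 0 g 1).foldl (aStep names pfx (pyCeilDiv (names.length : Int) g)) d
      = bScatter d pfx names g := by
  rcases lt_or_gt_of_ne hg with hneg | hpos
  · rw [PySem.List.pyRange_one_eq_nil (by omega), List.foldl_nil]
    rw [bScatter, if_pos (by omega)]
  · rw [bScatter, if_neg (by omega)]
    by_cases hne : names = []
    · subst hne
      rw [foldA_nil, PySem.List.enumerate_nil, List.foldl_nil]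
    · have hlen : 0 < names.length := List.length_pos_of_ne_nil hne
      have hb := pyCeilDiv_bounds (n := (names.length : Int)) (g := g) hpos
      have hsize : 0 < pyCeilDiv (names.length : Int) g := by nlinarith
      have hcov : (names.length : Int) ≤ g * pyCeilDiv (names.length : Int) g := by nlinarith
      have hA := lemA ((g - ((0 : Nat) : Int)).toNat) names pfx
        (pyCeilDiv (names.length : Int) g) g 0 d (le_refl _) hsize (by simp; omega) hcov
        (fun k hk => hfresh k hk)
      have hB := lemB names.length names pfx (pyCeilDiv (names.length : Int) g) 0 d
        (le_refl _) hsize (fun k hk => hfresh k hk)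
      apply PySem.Dict.ext
      have hA' := hA
      have hB' := hB
      simp only [Nat.cast_zero, List.drop_zero, zero_mul] at hA' hB'
      rw [hA', hB']

-- freshness of host keys over the dict produced by the lc pass
theorem fresh_host (lc : List String) (g : Int) (k : Nat) :
    (bScatter PySem.Dict.empty "lc_group_" lc g).get?
      ("host_group_" ++ PySem.Int.toStr (k : Int)) = none := by
  rw [bScatter]
  by_cases hg : g ≤ 0
  · rw [if_pos hg]; simp
  · rw [if_neg hg]
    by_cases hne : lc = []
    · subst hne
      rw [PySem.List.enumerate_nil, List.foldl_nil]
      simp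
    · have hlen : 0 < lc.length := List.length_pos_of_ne_nil hne
      have hpos : 0 < g := by omega
      have hb := pyCeilDiv_bounds (n := (lc.length : Int)) (g := g) hpos
      have hsize : 0 < pyCeilDiv (lc.length : Int) g := by nlinarith
      have hB := lemB lc.length lc "lc_group_" (pyCeilDiv (lc.length : Int) g) 0
        PySem.Dict.empty (le_refl _) hsize (fun m hm => by simp)
      simp only [Nat.cast_zero, zero_mul] at hB
      rw [PySem.Dict.get?_eq_none_iff_not_mem_keys]
      intro hmem
      simp only [PySem.Dict.keys, hB] at hmem
      obtain ⟨p, hp, hpk⟩ := List.mem_map.mp hmem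
      have hemp : (PySem.Dict.empty : PySem.Dict String (List String)).items = [] := rfl
      have hp' : p ∈ chunkPairs "lc_group_" (pyCeilDiv (lc.length : Int) g) lc 1 := by
        rw [hemp] at hp
        simpa using hp
      obtain ⟨m, _, hm⟩ := mem_chunkPairs_key lc.length lc (le_refl _) hp'
      exact key_cross (k : Int) (m : Int) (by rw [← hpk, hm])

-- ===== VERDICT (by name: the statement is the Claim_ definition above) =====
theorem create_features_dict_spec : Claim_equal_create_features_dict := by
  intro lc host lg hg _hdom hpre
  obtain ⟨hlg, hhg⟩ := hpre
  unfold Spec_create_features_dict create_features_dict create_features_dict_alt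
  have h1 := perList lc "lc_group_" lg hlg PySem.Dict.empty (fun k hk => by simp)
  have h2 := perList host "host_group_" hg hhg (bScatter PySem.Dict.empty "lc_group_" lc lg)
    (fun k hk => fresh_host lc lg k)
  simp only []
  rw [h1, h2]
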